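-- pv_equiv track=rewrite | github.com/grgueiros/study-experience | introducao-a-ciencia-da-computacao-com-python-I/exercicios-propostos/soma_hipotenusas.py | eh_hipotenusa
-- ===== SOURCE A (Python) =====
-- def eh_hipotenusa (numero):
--     i = numero
--     resultado = False
--     while i > 1:
--         j = numero
--         while j > 1 and resultado == False:
--             if numero ** 2 == i**2 + j**2:
--                 resultado = True
--             j -= 1
--         i -= 1
--
--     return resultado
-- ===== SOURCE B (Python) =====
-- def eh_hipotenusa(numero):
--     # Two-pointer sweep over ordered leg pairs (a, b), 2 <= a <= b <= numero - 1.
--     a = 2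
--     b = numero - 1
--     alvo = numero * numero
--     while a <= b:
--         soma = a * a + b * b
--         if soma == alvo:
--             return True
--         if soma < alvo:
--             a += 1
--         else:
--             b -= 1
--     return False
-- ===== Notes on version B (the rewrite author's own statement) =====
-- stated objective: faster
-- what changed: Replaced the exhaustive double loop over all leg pairs (i,j) in [2,numero]^2 by a single two-pointer sweep (a up, b down) over ordered pairs 2<=a<=b<=numero-1.
import Mathlib
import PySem

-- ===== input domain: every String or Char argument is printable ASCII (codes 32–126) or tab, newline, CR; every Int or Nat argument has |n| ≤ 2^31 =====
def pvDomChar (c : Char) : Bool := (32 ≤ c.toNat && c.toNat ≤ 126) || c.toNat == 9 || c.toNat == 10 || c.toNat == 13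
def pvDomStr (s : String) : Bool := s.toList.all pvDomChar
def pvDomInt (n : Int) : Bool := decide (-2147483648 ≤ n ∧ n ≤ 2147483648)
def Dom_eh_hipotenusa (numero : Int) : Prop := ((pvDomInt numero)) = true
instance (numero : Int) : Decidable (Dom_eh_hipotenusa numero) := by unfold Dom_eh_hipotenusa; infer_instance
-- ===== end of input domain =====

-- B replaces A's exhaustive O(n^2) double loop by an O(n) two-pointer sweep (objective: faster).

-- ===== PORT A =====
-- inner while loop: 'while j > 1 and resultado == False'
def ehHipInner (numero i : Int) (j : Int) (res : Bool) : Bool :=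
  if h : 1 < j ∧ res = false then
    ehHipInner numero i (j - 1) (if numero ^ 2 = i ^ 2 + j ^ 2 then true else res)
  else res
termination_by j.toNat
decreasing_by omega

-- outer while loop: 'while i > 1'
def ehHipOuter (numero : Int) (i : Int) (res : Bool) : Bool :=
  if h : 1 < i then
    ehHipOuter numero (i - 1) (ehHipInner numero i numero res)
  else res
termination_by i.toNat
decreasing_by omega

def eh_hipotenusa (numero : Int) : Bool :=
  ehHipOuter numero numero false

-- ===== PORT B =====
-- 'while a <= b' two-pointer loop of Source B
def ehHipSweep (alvo : Int) (a b : Int) : Bool :=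
  if h : a ≤ b then
    if a * a + b * b = alvo then true
    else if a * a + b * b < alvo then ehHipSweep alvo (a + 1) b
    else ehHipSweep alvo a (b - 1)
  else false
termination_by (b - a + 1).toNat
decreasing_by all_goals omega

def eh_hipotenusa_alt (numero : Int) : Bool :=
  ehHipSweep (numero * numero) 2 (numero - 1)

-- ===== PRECONDITION & SPEC =====
def Spec_eh_hipotenusa (numero : Int) (out : Bool) : Prop := out = eh_hipotenusa_alt numero
instance (numero : Int) (out : Bool) : Decidable (Spec_eh_hipotenusa numero out) := by unfold Spec_eh_hipotenusa; infer_instance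

-- ===== CLAIM (what is proved, stated in full; the proofs are below) =====
def Claim_equal_eh_hipotenusa : Prop := ∀ (numero : Int), Dom_eh_hipotenusa numero → Spec_eh_hipotenusa numero (eh_hipotenusa numero)

-- ===== LEMMAS AND PROOFS =====

lemma ehHipInner_iff (numero i : Int) (j : Int) (res : Bool) :
    ehHipInner numero i j res = true ↔
      (res = true ∨ ∃ k, 1 < k ∧ k ≤ j ∧ numero ^ 2 = i ^ 2 + k ^ 2) := by
  induction j, res using ehHipInner.induct numero i with
  | case1 j res h ih =>
    rw [ehHipInner, dif_pos h]
    obtain ⟨hj, hres⟩ := h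
    subst hres
    by_cases hx : numero ^ 2 = i ^ 2 + j ^ 2
    · simp [hx] at ih ⊢
      exact ⟨fun _ => ⟨j, hj, le_refl j, rfl⟩, fun _ => ih⟩
    · simp [hx] at ih ⊢
      rw [ih]
      constructor
      · rintro ⟨k, hk1, hk2, hk3⟩; exact ⟨k, hk1, by omega, hk3⟩
      · rintro ⟨k, hk1, hk2, hk3⟩
        refine ⟨k, hk1, ?_, hk3⟩
        rcases eq_or_lt_of_le hk2 with h | h
        · subst h; exact absurd hk3 hx
        · omega
  | case2 j res h =>
    rw [ehHipInner, dif_neg h]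
    rcases Bool.eq_false_or_eq_true res with hr | hr
    · subst hr; simp
    · subst hr
      have hj : ¬ 1 < j := fun hj => h ⟨hj, rfl⟩
      simp only [Bool.false_eq_true, false_or, false_iff]
      rintro ⟨k, hk1, hk2, _⟩
      omega

lemma ehHipOuter_iff (numero : Int) (i : Int) (res : Bool) :
    ehHipOuter numero i res = true ↔
      (res = true ∨ ∃ a, 1 < a ∧ a ≤ i ∧ ∃ k, 1 < k ∧ k ≤ numero ∧ numero ^ 2 = a ^ 2 + k ^ 2) := by
  induction i, res using ehHipOuter.induct numero with
  | case1 i res h ih =>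
    rw [ehHipOuter, dif_pos h, ih, ehHipInner_iff]
    constructor
    · rintro ((hr | ⟨k, hk1, hk2, hk3⟩) | ⟨a, ha1, ha2, hk⟩)
      · exact Or.inl hr
      · exact Or.inr ⟨i, h, le_refl i, k, hk1, hk2, hk3⟩
      · exact Or.inr ⟨a, ha1, by omega, hk⟩
    · rintro (hr | ⟨a, ha1, ha2, hk⟩)
      · exact Or.inl (Or.inl hr)
      · rcases eq_or_lt_of_le ha2 with heq | hlt
        · subst heq; exact Or.inl (Or.inr hk)
        · exact Or.inr ⟨a, ha1, by omega, hk⟩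
  | case2 i res h =>
    rw [ehHipOuter, dif_neg h]
    constructor
    · intro hr; exact Or.inl hr
    · rintro (hr | ⟨a, ha1, ha2, _⟩)
      · exact hr
      · omega

lemma ehHipSweep_iff (alvo : Int) (a b : Int) (ha : 0 ≤ a) :
    ehHipSweep alvo a b = true ↔
      ∃ x y, a ≤ x ∧ x ≤ y ∧ y ≤ b ∧ x * x + y * y = alvo := by
  induction a, b using ehHipSweep.induct alvo with
  | case1 a b hab heq =>
    rw [ehHipSweep, dif_pos hab, if_pos heq]
    simp only [true_iff]
    exact ⟨a, b, le_refl a, hab, le_refl b, heq⟩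
  | case2 a b hab hne hlt ih =>
    rw [ehHipSweep, dif_pos hab, if_neg hne, if_pos hlt, ih (by omega)]
    constructor
    · rintro ⟨x, y, hx, hxy, hyb, hsum⟩
      exact ⟨x, y, by omega, hxy, hyb, hsum⟩
    · rintro ⟨x, y, hx, hxy, hyb, hsum⟩
      refine ⟨x, y, ?_, hxy, hyb, hsum⟩
      rcases eq_or_lt_of_le hx with heq | hgt
      · exfalso
        subst heq
        have h1 : y * y ≤ b * b := by nlinarith
        omega
      · omega
  | case3 a b hab hne hge ih =>
    rw [ehHipSweep, dif_pos hab, if_neg hne, if_neg hge, ih ha]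
    constructor
    · rintro ⟨x, y, hx, hxy, hyb, hsum⟩
      exact ⟨x, y, hx, hxy, by omega, hsum⟩
    · rintro ⟨x, y, hx, hxy, hyb, hsum⟩
      refine ⟨x, y, hx, hxy, ?_, hsum⟩
      rcases eq_or_lt_of_le hyb with heq | hlt
      · exfalso
        subst heq
        have h1 : a * a ≤ x * x := by nlinarith
        omega
      · omega
  | case4 a b hab =>
    rw [ehHipSweep, dif_neg hab]
    simp only [Bool.false_eq_true, false_iff]
    rintro ⟨x, y, hx, hxy, hyb, _⟩
    omega

-- ===== VERDICT (by name: the statement is the Claim_ definition above) =====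
theorem eh_hipotenusa_spec : Claim_equal_eh_hipotenusa := by
  intro numero _
  unfold Spec_eh_hipotenusa eh_hipotenusa eh_hipotenusa_alt
  rw [Bool.eq_iff_iff, ehHipOuter_iff, ehHipSweep_iff _ _ _ (by omega)]
  constructor
  · rintro (hr | ⟨i, hi1, hi2, j, hj1, hj2, heq⟩)
    · exact absurd hr (by simp)
    · have hp : i * i + j * j = numero * numero := by
        simp only [pow_two] at heq; omega
      rcases le_total i j with h | h
      · refine ⟨i, j, by omega, h, ?_, hp⟩
        rcases eq_or_lt_of_le hj2 with he | hl
        · exfalso; subst he; nlinarith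
        · omega
      · refine ⟨j, i, by omega, h, ?_, by omega⟩
        rcases eq_or_lt_of_le hi2 with he | hl
        · exfalso; subst he; nlinarith
        · omega
  · rintro ⟨x, y, hx, hxy, hyb, hsum⟩
    refine Or.inr ⟨x, by omega, by omega, y, by omega, by omega, ?_⟩
    simp only [pow_two]
    omega
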